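-- pv_equiv track=rewrite | github.com/yebeike/NeSy-Edge | experiments/project/rq3_rebuild_v1/scripts/rebuild_utils_v1.py | compact_lines
-- ===== SOURCE A (Python) =====
-- from typing import Dict, Iterable, List, Mapping, Sequence
--
-- def compact_lines(lines: Sequence[str], max_chars: int) -> str:
--     kept: List[str] = []
--     total = 0
--     for line in lines:
--         text = str(line or "").strip()
--         if not text or text in kept:
--             continue
--         extra = len(text) + (1 if kept else 0)
--         if kept and total + extra > max_chars:
--             break
--         kept.append(text)
--         total += extra
--     return "\n".join(kept)
-- ===== SOURCE B (Python) =====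
-- def compact_lines(lines, max_chars):
--     # Stage 1: ordered dedup of the non-empty stripped lines.
--     uniq = list(dict.fromkeys(t for t in (str(l or "").strip() for l in lines) if t))
--     # Stage 2: cumulative joined lengths: cums[i] = len("\n".join(uniq[:i+1])).
--     cums = []
--     run = -1
--     for t in uniq:
--         run += len(t) + 1
--         cums.append(run)
--     # Stage 3: cums is strictly increasing (every text is non-empty), so the greedy
--     # prefix under the budget is a closed-form filter: the first line always, plus
--     # every later line whose cumulative joined length fits max_chars.
--     keep = uniq[:1] + [t for t, c in zip(uniq[1:], cums[1:]) if c <= max_chars]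
--     return "\n".join(keep)
-- ===== Notes on version B (the rewrite author's own statement) =====
-- stated objective: faster
-- what changed: Replaces A's fused greedy loop (kept list with linear membership scan, running total, break) by three staged passes: hash-based ordered dedup, a prefix-sum pass computing cumulative joined lengths, and a closed-form filter (first line plus every later line whose cumulative length fits), valid because the cumulative lengths are strictly increasing.
import Mathlib
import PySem

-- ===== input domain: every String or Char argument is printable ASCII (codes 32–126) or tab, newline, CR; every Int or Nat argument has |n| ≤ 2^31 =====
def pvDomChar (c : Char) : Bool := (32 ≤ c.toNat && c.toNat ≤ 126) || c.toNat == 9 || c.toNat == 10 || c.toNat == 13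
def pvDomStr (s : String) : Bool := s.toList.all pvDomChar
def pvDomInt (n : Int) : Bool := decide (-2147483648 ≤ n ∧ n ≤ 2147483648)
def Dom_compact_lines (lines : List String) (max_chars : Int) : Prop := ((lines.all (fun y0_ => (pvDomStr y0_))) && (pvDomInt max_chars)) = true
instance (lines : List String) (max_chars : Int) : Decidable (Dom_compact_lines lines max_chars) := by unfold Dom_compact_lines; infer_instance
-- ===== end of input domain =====

-- B replaces A's fused greedy loop by three staged passes (ordered dedup, prefix sums of joined lengths, a closed-form filter); objective: faster.

-- ===== PORT A =====
def compactLoopA (m : Int) : List String → List String → Int → List String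
  | [], kept, _ => kept
  | l :: ls, kept, total =>
    let text := PySem.Str.strip (if l = "" then "" else l)
    if text = "" ∨ text ∈ kept then compactLoopA m ls kept total
    else
      let extra := PySem.Str.len text + (if kept = [] then 0 else 1)
      if kept ≠ [] ∧ total + extra > m then kept
      else compactLoopA m ls (kept ++ [text]) (total + extra)

def compact_lines (lines : List String) (max_chars : Int) : String :=
  PySem.Str.join "\n" (compactLoopA max_chars lines [] 0)

-- ===== PORT B =====
-- Stage 2 of Source B: the running `run`/`cums.append` loop (run starts at -1).
def cumsB : Int → List String → List Int
  | _, [] => []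
  | run, t :: ts =>
    let r := run + PySem.Str.len t + 1
    r :: cumsB r ts

def compact_lines_alt (lines : List String) (max_chars : Int) : String :=
  let uniq := PySem.List.dedup
    ((lines.map (fun l => PySem.Str.strip (if l = "" then "" else l))).filter (fun t => t ≠ ""))
  let cums := cumsB (-1) uniq
  let keep := PySem.List.slice uniq none (some 1) ++
    (((PySem.List.slice uniq (some 1) none).zip (PySem.List.slice cums (some 1) none)).filter
      (fun p => decide (p.2 ≤ max_chars))).map Prod.fst
  PySem.Str.join "\n" keep

-- ===== PRECONDITION & SPEC =====
def Spec_compact_lines (lines : List String) (max_chars : Int) (out : String) : Prop := out = compact_lines_alt lines max_chars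
instance (lines : List String) (max_chars : Int) (out : String) : Decidable (Spec_compact_lines lines max_chars out) := by unfold Spec_compact_lines; infer_instance

-- ===== CLAIM (what is proved, stated in full; the proofs are below) =====
def Claim_equal_compact_lines : Prop := ∀ (lines : List String) (max_chars : Int), Dom_compact_lines lines max_chars → Spec_compact_lines lines max_chars (compact_lines lines max_chars)

-- ===== LEMMAS AND PROOFS =====

-- A's loop phrased over the not-yet-seen part of the deduped sequence (proof-only).
def budgetLoopB (m : Int) : List String → List String → Int → List String
  | [], result, _ => result
  | t :: ts, result, total =>
    let extra := PySem.Str.len t + (if result = [] then 0 else 1)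
    if result ≠ [] ∧ total + extra > m then result
    else budgetLoopB m ts (result ++ [t]) (total + extra)

-- dedup of the rest of the list, relative to an already-seen prefix
def relDedup (seen : List String) : List String → List String
  | [] => []
  | t :: ts => if t ∈ seen then relDedup seen ts else t :: relDedup (seen ++ [t]) ts

theorem update_eq_append_relDedup (xs : List String) : ∀ (seen : List String),
    PySem.Set.update seen xs = seen ++ relDedup seen xs := by
  induction xs with
  | nil => intro seen; simp [PySem.Set.update_nil, relDedup]
  | cons x xs ih =>
    intro seen
    rw [PySem.Set.update_cons]
    by_cases h : x ∈ seen
    · rw [PySem.Set.add_of_mem h]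
      simp [relDedup, h, ih]
    · rw [PySem.Set.add_of_not_mem h, ih]
      simp [relDedup, h]

theorem ifOrEmpty (l : String) : (if l = "" then "" else l) = l := by
  split_ifs with h
  · exact h.symm
  · rfl

theorem loopA_eq_loopB (m : Int) (ls : List String) : ∀ (kept : List String) (total : Int),
    compactLoopA m ls kept total =
      budgetLoopB m (relDedup kept ((ls.map (fun l => PySem.Str.strip l)).filter (fun t => t ≠ ""))) kept total := by
  induction ls with
  | nil => intro kept total; simp [compactLoopA, relDedup, budgetLoopB]
  | cons l ls ih =>
    intro kept total
    by_cases hE : PySem.Str.strip l = ""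
    · simpa [compactLoopA, ifOrEmpty, hE] using ih kept total
    · by_cases hM : PySem.Str.strip l ∈ kept
      · simpa [compactLoopA, ifOrEmpty, hE, hM, relDedup] using ih kept total
      · simp only [List.map_cons]
        rw [List.filter_cons_of_pos (by simp [hE])]
        simp only [compactLoopA, ifOrEmpty]
        rw [if_neg (by simp [hE, hM] : ¬(PySem.Str.strip l = "" ∨ PySem.Str.strip l ∈ kept))]
        simp only [relDedup, if_neg hM, budgetLoopB]
        by_cases hB : kept ≠ [] ∧ total + (PySem.Str.len (PySem.Str.strip l) + (if kept = [] then 0 else 1)) > m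
        · rw [if_pos hB, if_pos hB]
        · rw [if_neg hB, if_neg hB]
          exact ih _ _

theorem len_pos_of_ne_empty (t : String) (h : t ≠ "") : 1 ≤ PySem.Str.len t := by
  simp [PySem.Str.len_eq]
  exact Nat.one_le_iff_ne_zero.mpr (by simpa [String.length_eq_zero_iff] using h)

-- once the running length has reached m, every later cumulative length exceeds m
theorem filter_cums_nil (m : Int) (ts : List String) : ∀ (run : Int),
    (∀ t ∈ ts, 1 ≤ PySem.Str.len t) → m ≤ run →
    ((ts.zip (cumsB run ts)).filter (fun p => decide (p.2 ≤ m))).map Prod.fst = [] := by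
  induction ts with
  | nil => intro run _ _; rfl
  | cons t ts ih =>
    intro run hlen hm
    have h1 : 1 ≤ PySem.Str.len t := hlen t (by simp)
    simp only [cumsB, List.zip_cons_cons]
    rw [List.filter_cons_of_neg (by simp; omega)]
    exact ih _ (fun x hx => hlen x (by simp [hx])) (by omega)

theorem budgetLoopB_eq_filter (m : Int) (ts : List String) : ∀ (result : List String) (total : Int),
    result ≠ [] → (∀ t ∈ ts, 1 ≤ PySem.Str.len t) →
    budgetLoopB m ts result total =
      result ++ ((ts.zip (cumsB total ts)).filter (fun p => decide (p.2 ≤ m))).map Prod.fst := by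
  induction ts with
  | nil => intro result total _ _; simp [budgetLoopB, cumsB]
  | cons t ts ih =>
    intro result total hres hlen
    have h1 : 1 ≤ PySem.Str.len t := hlen t (by simp)
    simp only [budgetLoopB, cumsB, List.zip_cons_cons, if_neg (show ¬ result = [] from hres)]
    by_cases hc : total + PySem.Str.len t + 1 ≤ m
    · rw [if_neg (by rintro ⟨-, hgt⟩; omega)]
      rw [List.filter_cons_of_pos (by simpa using hc)]
      rw [ih (result ++ [t]) _ (by simp) (fun x hx => hlen x (by simp [hx]))]
      simp [add_assoc]
    · rw [if_pos ⟨hres, by omega⟩]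
      rw [List.filter_cons_of_neg (by simpa using hc)]
      rw [filter_cums_nil m ts _ (fun x hx => hlen x (by simp [hx])) (by omega)]
      simp

theorem final_eq (m : Int) (uniq : List String) (h : ∀ t ∈ uniq, 1 ≤ PySem.Str.len t) :
    budgetLoopB m uniq [] 0 =
      PySem.List.slice uniq none (some 1) ++
        (((PySem.List.slice uniq (some 1) none).zip (PySem.List.slice (cumsB (-1) uniq) (some 1) none)).filter
          (fun p => decide (p.2 ≤ m))).map Prod.fst := by
  cases uniq with
  | nil => rfl
  | cons t ts =>
    have hts : ∀ x ∈ ts, 1 ≤ PySem.Str.len x := fun x hx => h x (List.mem_cons_of_mem _ hx)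
    simp only [budgetLoopB, cumsB]
    rw [if_neg (by rintro ⟨hh, -⟩; exact hh rfl)]
    rw [show ([] ++ [t] : List String) = [t] from rfl,
      show (0 + (PySem.Str.len t + if True then 0 else 1)) = PySem.Str.len t from by simp]
    rw [budgetLoopB_eq_filter m ts [t] _ (by simp) hts]
    rw [show (-1 : Int) + PySem.Str.len t + 1 = PySem.Str.len t from by ring]
    rw [PySem.List.slice_from_one, PySem.List.slice_from_one]
    rw [show (some (1 : Int)) = some ((1 : Nat) : Int) from rfl, PySem.List.slice_to_natCast]
    simp

-- ===== VERDICT (by name: the statement is the Claim_ definition above) =====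
theorem compact_lines_spec : Claim_equal_compact_lines := by
  intro lines max_chars _
  unfold Spec_compact_lines compact_lines compact_lines_alt
  have hf : (fun l => PySem.Str.strip (if l = "" then "" else l)) = (fun l : String => PySem.Str.strip l) :=
    funext fun l => by rw [ifOrEmpty]
  rw [hf, loopA_eq_loopB]
  have hrd : relDedup [] ((lines.map (fun l => PySem.Str.strip l)).filter (fun t => t ≠ "")) =
      PySem.List.dedup ((lines.map (fun l => PySem.Str.strip l)).filter (fun t => t ≠ "")) := by
    rw [PySem.List.dedup_eq_ofList, ← PySem.Set.update_nil_left, update_eq_append_relDedup]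
    simp
  rw [hrd]
  have hne : ∀ t ∈ PySem.List.dedup ((lines.map (fun l => PySem.Str.strip l)).filter (fun t => t ≠ "")),
      1 ≤ PySem.Str.len t := by
    intro t ht
    rw [PySem.List.mem_dedup] at ht
    exact len_pos_of_ne_empty t (by simpa using List.of_mem_filter ht)
  exact congrArg (PySem.Str.join "\n") (final_eq max_chars _ hne)
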